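-- pv_equiv track=rewrite | github.com/tshililopercy/Cpp_Github-Open-source_Inheritance_Analyzer | StoreData.py | HierachyCountPerDepth
-- ===== SOURCE A (Python) =====
-- def HierachyCountPerDepth(max_depths):
--     total_hierachies = []
--     depth_sequence = []
--     for depth_val in range(1, max(max_depths)+1, 1):
--         count=0
--         depth_sequence.append(depth_val)
--         for depth_ in max_depths:
--             if depth_val == depth_:
--                 count += 1
--         total_hierachies.append(count)
--     return depth_sequence, total_hierachies
-- ===== SOURCE B (Python) =====
-- def HierachyCountPerDepth(max_depths):
--     m = max(max_depths)
--     s = sorted(max_depths)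
--     n = len(s)
--     i = 0
--     while i < n and s[i] < 1:
--         i += 1
--     depth_sequence = list(range(1, m + 1))
--     total_hierachies = []
--     for d in depth_sequence:
--         run = 0
--         while i < n and s[i] == d:
--             run += 1
--             i += 1
--         total_hierachies.append(run)
--     return depth_sequence, total_hierachies
-- ===== Notes on version B (the rewrite author's own statement) =====
-- stated objective: faster
-- what changed: B sorts a copy of the list once, skips values below 1 with an advancing pointer, and reads each depth's frequency as the length of a run of consecutive equal elements in one linear sweep, instead of A's full rescan of the unsorted list for every depth value 1..max.
import Mathlib
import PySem

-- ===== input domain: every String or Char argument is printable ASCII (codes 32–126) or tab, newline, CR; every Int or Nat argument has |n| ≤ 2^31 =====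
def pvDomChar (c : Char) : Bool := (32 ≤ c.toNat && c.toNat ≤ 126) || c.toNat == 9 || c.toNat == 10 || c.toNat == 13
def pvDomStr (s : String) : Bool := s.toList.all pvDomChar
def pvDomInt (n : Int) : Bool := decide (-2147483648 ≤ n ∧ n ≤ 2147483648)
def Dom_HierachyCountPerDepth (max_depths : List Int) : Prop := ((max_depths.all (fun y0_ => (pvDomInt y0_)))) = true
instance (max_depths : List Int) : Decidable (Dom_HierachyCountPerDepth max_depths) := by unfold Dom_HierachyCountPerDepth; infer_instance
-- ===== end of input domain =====

-- B sorts a copy once and reads each depth's frequency as a run of equal elements in one sweep, instead of A's rescan per depth (faster).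


-- ===== PORT A =====
-- for depth_val in range(1, max(max_depths)+1): inner scan counts equal elements; both lists grow by append
def HierachyCountPerDepth (max_depths : List Int) : List Int × List Int :=
  let m := (PySem.List.max? max_depths (fun x => x)).getD 0
  (PySem.List.pyRange 1 (m + 1) 1).foldl
    (fun (acc : List Int × List Int) depth_val =>
      let count := max_depths.foldl (fun c depth_ => if depth_val == depth_ then c + 1 else c) (0 : Int)
      (acc.1 ++ [depth_val], acc.2 ++ [count]))
    ([], [])

-- ===== PORT B =====
-- the inner 'while i < n and s[i] == d: run += 1; i += 1' of Source B: take the run of d's, continue on the rest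
def pvRuns : List Int → List Int → List Int
  | [], _ => []
  | d :: ds, s =>
      (((s.takeWhile (fun x => x == d)).length : Int)) :: pvRuns ds (s.dropWhile (fun x => x == d))

-- m = max(...); s = sorted(...); skip s[i] < 1; then one linear sweep of runs over range(1, m+1)
def HierachyCountPerDepth_alt (max_depths : List Int) : List Int × List Int :=
  let m := (PySem.List.max? max_depths (fun x => x)).getD 0
  let s := PySem.List.sorted max_depths (fun x => x) false
  let s' := s.dropWhile (fun x => decide (x < 1))
  let depth_sequence := PySem.List.pyRange 1 (m + 1) 1
  (depth_sequence, pvRuns depth_sequence s')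

-- ===== PRECONDITION & SPEC =====
-- Pre_ excludes only the empty list, on which max() raises ValueError in both A and B.
def Pre_HierachyCountPerDepth (max_depths : List Int) : Prop := max_depths ≠ []
instance (max_depths : List Int) : Decidable (Pre_HierachyCountPerDepth max_depths) := by unfold Pre_HierachyCountPerDepth; infer_instance
def pvWitness_HierachyCountPerDepth : List Int := [1, 2, 2, 3]

def Spec_HierachyCountPerDepth (max_depths : List Int) (out : List Int × List Int) : Prop := out = HierachyCountPerDepth_alt max_depths
instance (max_depths : List Int) (out : List Int × List Int) : Decidable (Spec_HierachyCountPerDepth max_depths out) := by unfold Spec_HierachyCountPerDepth; infer_instance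

-- ===== CLAIM (what is proved, stated in full; the proofs are below) =====
def Claim_equal_HierachyCountPerDepth : Prop := ∀ (max_depths : List Int), Dom_HierachyCountPerDepth max_depths → Pre_HierachyCountPerDepth max_depths → Spec_HierachyCountPerDepth max_depths (HierachyCountPerDepth max_depths)

-- ===== LEMMAS AND PROOFS =====

-- A's inner scan is List.count
theorem foldl_count_eq (v : Int) (xs : List Int) :
    xs.foldl (fun c depth_ => if v == depth_ then c + 1 else c) (0 : Int) = (xs.count v : Int) := by
  have h : ∀ (c : Int), xs.foldl (fun c depth_ => if v == depth_ then c + 1 else c) c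
      = c + (xs.count v : Int) := by
    induction xs with
    | nil => simp
    | cons x t ih =>
      intro c
      simp only [List.foldl_cons, List.count_cons, ih]
      by_cases hx : v = x
      · simp [hx]; ring
      · have hx' : ¬ x = v := fun h => hx h.symm
        simp [beq_iff_eq, hx, hx']
  simpa using h 0

-- A's accumulating foldl builds (range, range.map count)
theorem foldl_pair_append (l : List Int) (f : Int → Int) (a b : List Int) :
    l.foldl (fun (acc : List Int × List Int) v => (acc.1 ++ [v], acc.2 ++ [f v])) (a, b)
      = (a ++ l, b ++ l.map f) := by
  induction l generalizing a b with
  | nil => simp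
  | cons x t ih => simp [ih]

-- splitting a sorted list bounded below by a at the run of a's
theorem sorted_run_split (a : Int) (s : List Int) (hs : s.Pairwise (· ≤ ·)) (hge : ∀ x ∈ s, a ≤ x) :
    (s.takeWhile (fun x => x == a)).length = s.count a
    ∧ (∀ x ∈ s.dropWhile (fun x => x == a), a + 1 ≤ x)
    ∧ (∀ d : Int, d ≠ a → (s.dropWhile (fun x => x == a)).count d = s.count d) := by
  induction s with
  | nil => simp
  | cons x t ih =>
    rcases List.pairwise_cons.mp hs with ⟨hxt, ht⟩
    by_cases hx : x = a
    · subst hx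
      have hget : ∀ y ∈ t, x ≤ y := fun y hy => hge y (List.mem_cons_of_mem _ hy)
      rcases ih ht hget with ⟨h1, h2, h3⟩
      refine ⟨?_, ?_, ?_⟩
      · simp [h1]
      · simpa [List.dropWhile_cons] using h2
      · intro d hd
        have hxd : ¬ x = d := fun h => hd h.symm
        simp [h3 d hd, hxd]
    · have hax : a ≤ x := hge x List.mem_cons_self
      have hax' : a + 1 ≤ x := by
        rcases lt_or_eq_of_le hax with h | h
        · omega
        · exact absurd h.symm hx
      have hnot : ¬ (x == a) = true := by simp [hx]
      refine ⟨?_, ?_, ?_⟩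
      · have hnoat : t.count a = 0 := by
          rw [List.count_eq_zero]
          intro ha
          have := hxt a ha
          omega
        simp [hnot, hnoat, hx]
      · intro y hy
        simp only [List.dropWhile_cons, beq_iff_eq, hx, if_false] at hy
        rcases List.mem_cons.mp hy with h | h
        · omega
        · have := hxt y h; omega
      · intro d _
        simp [hnot]

-- the run-length sweep over range(a, b) of a sorted list bounded below by a yields the counts
theorem pvRuns_eq_counts (b : Int) : ∀ (a : Int) (s : List Int), s.Pairwise (· ≤ ·) → (∀ x ∈ s, a ≤ x) →
    pvRuns (PySem.List.pyRange a b 1) s = (PySem.List.pyRange a b 1).map (fun d => (s.count d : Int)) := by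
  have hk : ∀ (k : Nat) (a : Int), (b - a).toNat = k → ∀ (s : List Int), s.Pairwise (· ≤ ·) → (∀ x ∈ s, a ≤ x) →
      pvRuns (PySem.List.pyRange a b 1) s = (PySem.List.pyRange a b 1).map (fun d => (s.count d : Int)) := by
    intro k
    induction k with
    | zero =>
      intro a hba s _ _
      rw [PySem.List.pyRange_one_eq_nil (by omega)]
      simp [pvRuns]
    | succ n ih =>
      intro a hba s hs hge
      have hab : a < b := by omega
      rw [PySem.List.pyRange_one_cons hab]
      rcases sorted_run_split a s hs hge with ⟨h1, h2, h3⟩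
      have hs' : (s.dropWhile (fun x => x == a)).Pairwise (· ≤ ·) :=
        List.Pairwise.sublist (List.dropWhile_sublist _) hs
      have ihres := ih (a + 1) (by omega) (s.dropWhile (fun x => x == a)) hs' h2
      simp only [pvRuns, h1, ihres, List.map_cons]
      congr 1
      apply List.map_congr_left
      intro d hd
      have hd1 : a + 1 ≤ d := (PySem.List.mem_pyRange_one.mp hd).1
      rw [h3 d (by omega)]
  intro a; exact hk (b - a).toNat a rfl

-- skipping the values < 1 of a sorted list: all remaining ≥ 1, counts of d ≥ 1 preserved
theorem drop_lt_one (l : List Int) (hl : l.Pairwise (· ≤ ·)) :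
    (∀ x ∈ l.dropWhile (fun x => decide (x < 1)), (1 : Int) ≤ x)
    ∧ (∀ d : Int, 1 ≤ d → (l.dropWhile (fun x => decide (x < 1))).count d = l.count d) := by
  induction l with
  | nil => simp
  | cons x t ih =>
    rcases List.pairwise_cons.mp hl with ⟨hxt, ht⟩
    rcases ih ht with ⟨h1, h2⟩
    by_cases hx : x < 1
    · refine ⟨?_, ?_⟩
      · simpa [hx] using h1
      · intro d hd
        have hdx : d ≠ x := by omega
        simp [hx, h2 d hd, Ne.symm hdx]
    · refine ⟨?_, ?_⟩
      · intro y hy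
        rw [List.dropWhile_cons_of_neg (by simpa using hx)] at hy
        rcases List.mem_cons.mp hy with h | h
        · omega
        · have := hxt y h; omega
      · intro d _
        simp [hx]

-- ===== VERDICT (by name: the statement is the Claim_ definition above) =====
theorem HierachyCountPerDepth_spec : Claim_equal_HierachyCountPerDepth := by
  intro xs _ _
  show _ = _
  unfold HierachyCountPerDepth HierachyCountPerDepth_alt
  rw [show (fun (acc : List Int × List Int) depth_val =>
        (acc.1 ++ [depth_val],
         acc.2 ++ [xs.foldl (fun c depth_ => if depth_val == depth_ then c + 1 else c) (0 : Int)]))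
      = (fun (acc : List Int × List Int) v => (acc.1 ++ [v], acc.2 ++ [(xs.count v : Int)]))
    from funext fun acc => funext fun v => by rw [foldl_count_eq]]
  rw [foldl_pair_append]
  have hsorted : (PySem.List.sorted xs (fun x => x) false).Pairwise (· ≤ ·) := by
    simpa using PySem.List.sorted_pairwise (xs := xs) (key := fun x => x)
  rcases drop_lt_one (PySem.List.sorted xs (fun x => x) false) hsorted with ⟨h1, h2⟩
  have hs' : ((PySem.List.sorted xs (fun x => x) false).dropWhile (fun x => decide (x < 1))).Pairwise (· ≤ ·) :=
    List.Pairwise.sublist (List.dropWhile_sublist _) hsorted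
  dsimp only
  rw [pvRuns_eq_counts _ 1 _ hs' h1]
  simp only [List.nil_append]
  congr 1
  apply List.map_congr_left
  intro d hd
  have hd1 : (1 : Int) ≤ d := (PySem.List.mem_pyRange_one.mp hd).1
  rw [h2 d hd1, (PySem.List.sorted_perm (xs := xs) (key := fun x => x) (rev := false)).count_eq]
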